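-- pv_equiv track=rewrite | github.com/maus1143/RatSecure | RatSecure.py | is_suspicious
-- ===== SOURCE A (Python) =====
-- def is_suspicious(ip_address):
--     suspicious_ips = ["192.168.1.100", "10.0.0.2", "127.0.0.1", "142.251.36.195"]
--     suspicious_ranges = [("192.168.0.", 255), ("10.0.0.", 255)]
--
--     if ip_address in suspicious_ips:
--         return True
--
--     for base_ip, range_end in suspicious_ranges:
--         for i in range(1, range_end + 1):
--             if ip_address == f"{base_ip}{i}":
--                 return True
--     return False
-- ===== SOURCE B (Python) =====
-- def is_suspicious(ip_address):
--     suspicious_ips = ["192.168.1.100", "10.0.0.2", "127.0.0.1", "142.251.36.195"]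
--     suspicious_ranges = [("192.168.0.", 255), ("10.0.0.", 255)]
--
--     if ip_address in suspicious_ips:
--         return True
--
--     for base_ip, range_end in suspicious_ranges:
--         if ip_address.startswith(base_ip):
--             suffix = ip_address[len(base_ip):]
--             if suffix.isdigit():
--                 n = int(suffix)
--                 if 1 <= n <= range_end and str(n) == suffix:
--                     return True
--     return False
-- ===== Notes on version B (the rewrite author's own statement) =====
-- stated objective: faster
-- what changed: B parses the suffix after the range base (startswith + canonical decimal check via str(int(suffix)) == suffix) instead of enumerating and comparing against all 255 generated strings per range.
import Mathlib
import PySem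

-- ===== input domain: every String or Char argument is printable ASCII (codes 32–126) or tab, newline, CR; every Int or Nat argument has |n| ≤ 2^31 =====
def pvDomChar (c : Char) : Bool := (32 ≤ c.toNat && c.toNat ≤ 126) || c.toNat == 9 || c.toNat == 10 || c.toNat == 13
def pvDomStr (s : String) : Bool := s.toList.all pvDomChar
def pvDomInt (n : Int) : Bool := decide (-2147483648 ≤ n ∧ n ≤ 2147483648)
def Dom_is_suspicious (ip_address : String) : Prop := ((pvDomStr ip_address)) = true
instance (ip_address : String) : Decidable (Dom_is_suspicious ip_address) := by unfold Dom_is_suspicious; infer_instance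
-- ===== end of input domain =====

-- B parses the suffix after each range base (startswith + canonical-decimal check) instead of
-- enumerating all 255 candidate strings per range; same results, fewer comparisons.


-- ===== PORT A =====
def is_suspicious (ip_address : String) : Bool :=
  let suspicious_ips : List String := ["192.168.1.100", "10.0.0.2", "127.0.0.1", "142.251.36.195"]
  let suspicious_ranges : List (String × Int) := [("192.168.0.", 255), ("10.0.0.", 255)]
  if suspicious_ips.contains ip_address then true
  else
    suspicious_ranges.any (fun br =>
      (PySem.List.pyRange 1 (br.2 + 1)).any (fun i =>
        ip_address.toList == br.1.toList ++ PySem.Int.toChars i))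

-- ===== PORT B =====
def is_suspicious_alt (ip_address : String) : Bool :=
  let suspicious_ips : List String := ["192.168.1.100", "10.0.0.2", "127.0.0.1", "142.251.36.195"]
  let suspicious_ranges : List (String × Int) := [("192.168.0.", 255), ("10.0.0.", 255)]
  if suspicious_ips.contains ip_address then true
  else
    suspicious_ranges.any (fun br =>
      PySem.Chars.startswith ip_address.toList br.1.toList &&
      (let suffix := PySem.List.slice ip_address.toList (some (br.1.toList.length : Int)) none
       PySem.Chars.strIsdigit suffix &&
       (match PySem.Int.ofChars? suffix with
        | some n => decide (1 ≤ n) && decide (n ≤ br.2) && (PySem.Int.toChars n == suffix)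
        | none => false)))

-- ===== PRECONDITION & SPEC =====
def Spec_is_suspicious (ip_address : String) (out : Bool) : Prop := out = is_suspicious_alt ip_address
instance (ip_address : String) (out : Bool) : Decidable (Spec_is_suspicious ip_address out) := by unfold Spec_is_suspicious; infer_instance

-- ===== CLAIM (what is proved, stated in full; the proofs are below) =====
def Claim_equal_is_suspicious : Prop := ∀ (ip_address : String), Dom_is_suspicious ip_address → Spec_is_suspicious ip_address (is_suspicious ip_address)

-- ===== LEMMAS AND PROOFS =====

-- str(i) of each enumerated i is canonical: all digits, and int() reads it back as i.
set_option maxRecDepth 8000 in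
theorem pv_digits_fact : ∀ i ∈ PySem.List.pyRange 1 256,
    PySem.Chars.strIsdigit (PySem.Int.toChars i) = true ∧
    PySem.Int.ofChars? (PySem.Int.toChars i) = some i := by decide

-- one range: A's enumeration over 1..255 equals B's parse of the suffix
theorem pv_range_iff (base cs : List Char) :
    ((PySem.List.pyRange 1 256).any (fun i => cs == base ++ PySem.Int.toChars i))
    = (PySem.Chars.startswith cs base &&
       (PySem.Chars.strIsdigit (cs.drop base.length) &&
        (match PySem.Int.ofChars? (cs.drop base.length) with
         | some n => decide (1 ≤ n) && decide (n ≤ (255 : Int)) && (PySem.Int.toChars n == cs.drop base.length)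
         | none => false))) := by
  rw [Bool.eq_iff_iff]
  simp only [List.any_eq_true, beq_iff_eq, Bool.and_eq_true]
  constructor
  · rintro ⟨i, hi, rfl⟩
    obtain ⟨hd, ho⟩ := pv_digits_fact i hi
    rw [PySem.List.mem_pyRange_one] at hi
    simp only [List.drop_left]
    refine ⟨?_, hd, ?_⟩
    · rw [PySem.Chars.startswith_iff]
      exact ⟨_, rfl⟩
    · rw [ho]
      simp only [Bool.and_eq_true, decide_eq_true_eq, beq_iff_eq]
      exact ⟨⟨hi.1, by omega⟩, trivial⟩
  · rintro ⟨hs, _hd, hm⟩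
    rw [PySem.Chars.startswith_iff] at hs
    obtain ⟨t, rfl⟩ := hs
    simp only [List.drop_left] at hm
    cases ho : PySem.Int.ofChars? t with
    | none => rw [ho] at hm; exact absurd hm (by simp)
    | some n =>
      rw [ho] at hm
      simp only [Bool.and_eq_true, decide_eq_true_eq, beq_iff_eq] at hm
      obtain ⟨⟨h1, h255⟩, ht⟩ := hm
      exact ⟨n, PySem.List.mem_pyRange_one.mpr ⟨h1, by omega⟩, by rw [ht]⟩

-- ===== VERDICT (by name: the statement is the Claim_ definition above) =====
theorem is_suspicious_spec : Claim_equal_is_suspicious := by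
  intro ip _hdom
  unfold Spec_is_suspicious is_suspicious is_suspicious_alt
  cases hc : List.contains ["192.168.1.100", "10.0.0.2", "127.0.0.1", "142.251.36.195"] ip
  · simp only [hc, Bool.false_eq_true, if_false, List.any_cons, List.any_nil, Bool.or_false]
    simp only [show ((255 : Int) + 1) = 256 from rfl, PySem.List.slice_from_natCast]
    exact congrArg₂ (· || ·) (pv_range_iff _ _) (pv_range_iff _ _)
  · rw [if_pos hc, if_pos hc]
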